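-- pv_equiv track=rewrite | github.com/JanKue/AdventOfCode | 2022/day10.py | parse_signal_values
-- ===== SOURCE A (Python) =====
-- def parse_signal_values(instructions):
--     values = [1]
--     i = 0
--     for instruction in instructions:
--         if instruction == "noop":
--             values.append(values[i])
--             i += 1
--         if instruction[:4] == "addx":
--             values.append(values[i])
--             i += 1
--             _, number = instruction.split()
--             values.append(values[i] + int(number))
--             i += 1
--     return values
-- ===== SOURCE B (Python) =====
-- def _deltas(instruction):
--     # register deltas contributed by one instruction (one 0 per elapsed cycle,
--     # plus the addx amount on its second cycle)
--     ds = []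
--     if instruction == "noop":
--         ds.append(0)
--     if instruction[:4] == "addx":
--         _, number = instruction.split()
--         ds.append(0)
--         ds.append(int(number))
--     return ds
--
--
-- def parse_signal_values(instructions):
--     deltas = []
--     for instruction in instructions:
--         deltas.extend(_deltas(instruction))
--     total = 1
--     values = [1]
--     for d in deltas:
--         total += d
--         values.append(total)
--     return values
-- ===== Notes on version B (the rewrite author's own statement) =====
-- stated objective: alternative
-- what changed: B first flattens the instructions into a list of per-cycle register deltas and then produces the history as a running prefix sum seeded with 1, instead of A's single loop that re-reads the last appended element through a manually maintained index i.
import Mathlib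
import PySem

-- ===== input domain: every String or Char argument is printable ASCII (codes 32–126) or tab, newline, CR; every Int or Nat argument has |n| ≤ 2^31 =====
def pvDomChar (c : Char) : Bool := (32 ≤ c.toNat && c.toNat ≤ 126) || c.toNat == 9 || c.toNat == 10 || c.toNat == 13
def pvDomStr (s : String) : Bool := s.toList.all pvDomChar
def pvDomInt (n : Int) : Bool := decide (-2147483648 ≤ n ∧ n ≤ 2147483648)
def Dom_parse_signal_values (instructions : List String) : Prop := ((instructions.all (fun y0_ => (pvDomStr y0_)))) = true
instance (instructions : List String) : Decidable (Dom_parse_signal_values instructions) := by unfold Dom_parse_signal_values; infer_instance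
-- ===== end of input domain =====

-- B replaces A's single loop (with its manually maintained index i into the growing
-- output) by two phases: flatten the instructions to a list of per-cycle deltas, then
-- take a running prefix sum seeded with 1.  Objective: alternative decomposition.

-- ===== PORT A =====
-- one step of A's loop body; values[i] is ported as (pyGet? …).getD 0, exact because
-- i always indexes the last appended element (in range), so Python never raises there
def pvStepA (st : List Int × Int) (instruction : String) : List Int × Int :=
  let st1 :=
    if instruction == "noop" then
      (st.1 ++ [(PySem.List.pyGet? st.1 st.2).getD 0], st.2 + 1)
    else st
  if PySem.Str.slice instruction none (some 4) == "addx" then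
    let values := st1.1 ++ [(PySem.List.pyGet? st1.1 st1.2).getD 0]
    let i := st1.2 + 1
    match PySem.Str.split₀ instruction with
    | [_, number] =>
        (values ++ [(PySem.List.pyGet? values i).getD 0 + (PySem.Int.ofStr? number).getD 0], i + 1)
    | _ => (values, i)  -- Python raises ValueError on the unpacking here; excluded by Pre_
  else st1

def parse_signal_values (instructions : List String) : List Int :=
  (instructions.foldl pvStepA ([1], 0)).1

-- ===== PORT B =====
-- port of Source B's helper _deltas
def pvDeltas (instruction : String) : List Int :=
  let ds := if instruction == "noop" then [(0 : Int)] else []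
  if PySem.Str.slice instruction none (some 4) == "addx" then
    match PySem.Str.split₀ instruction with
    | [_, number] => ds ++ [0, (PySem.Int.ofStr? number).getD 0]
    | _ => ds  -- Python raises ValueError on the unpacking here; excluded by Pre_
  else ds

-- one step of Source B's second (prefix-sum) loop: state (total, values)
def pvScanStep (st : Int × List Int) (d : Int) : Int × List Int :=
  (st.1 + d, st.2 ++ [st.1 + d])

def parse_signal_values_alt (instructions : List String) : List Int :=
  let deltas := instructions.foldl (fun acc instruction => acc ++ pvDeltas instruction) []
  (deltas.foldl pvScanStep (1, [1])).2

-- ===== PRECONDITION & SPEC =====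
-- Pre_ excludes exactly the inputs where Python A raises: an instruction whose first
-- four characters are "addx" must split into exactly two words ('_, number = split()')
-- whose second word int() accepts; otherwise ValueError.
def Pre_parse_signal_values (instructions : List String) : Prop :=
  ∀ s ∈ instructions, PySem.Str.slice s none (some 4) = "addx" →
    (PySem.Str.split₀ s).length = 2 ∧
      (PySem.Int.ofStr? ((PySem.Str.split₀ s).getD 1 "")).isSome = true
instance (instructions : List String) : Decidable (Pre_parse_signal_values instructions) := by
  unfold Pre_parse_signal_values; infer_instance

def pvWitness_parse_signal_values : List String := ["noop", "addx 3", "addx -5", "noop"]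

def Spec_parse_signal_values (instructions : List String) (out : List Int) : Prop := out = parse_signal_values_alt instructions
instance (instructions : List String) (out : List Int) : Decidable (Spec_parse_signal_values instructions out) := by unfold Spec_parse_signal_values; infer_instance

-- ===== CLAIM (what is proved, stated in full; the proofs are below) =====
def Claim_equal_parse_signal_values : Prop := ∀ (instructions : List String), Dom_parse_signal_values instructions → Pre_parse_signal_values instructions → Spec_parse_signal_values instructions (parse_signal_values instructions)

-- ===== LEMMAS AND PROOFS =====

lemma pv_last_get (v : List Int) (t : Int) :
    (PySem.List.pyGet? (v ++ [t]) ((((v ++ [t]).length : Int)) - 1)).getD 0 = t := by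
  have h : (((v ++ [t]).length : Int)) - 1 = ((v.length : Nat) : Int) := by
    simp
  rw [h, PySem.List.pyGet?_natCast]
  simp

lemma pv_main (l : List String)
    (hpre : ∀ s ∈ l, PySem.Str.slice s none (some 4) = "addx" →
      (PySem.Str.split₀ s).length = 2 ∧
        (PySem.Int.ofStr? ((PySem.Str.split₀ s).getD 1 "")).isSome = true) :
    ∀ (t : Int) (v : List Int),
      (l.foldl pvStepA (v ++ [t], ((v ++ [t]).length : Int) - 1)).1
        = ((l.flatMap pvDeltas).foldl pvScanStep (t, v ++ [t])).2 := by
  induction l with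
  | nil => intro t v; simp
  | cons s l ih =>
      intro t v
      have hs := hpre s (by simp)
      have ihl := fun t v => ih (fun s hs => hpre s (by simp [hs])) t v
      simp only [List.foldl_cons, List.flatMap_cons, List.foldl_append]
      by_cases hnoop : s = "noop"
      · subst hnoop
        have hb1 : (("noop" : String) == "noop") = true := by decide
        have hb2 : (PySem.Str.slice "noop" none (some 4) == "addx") = false := by decide
        simp only [pvStepA, pvDeltas, hb1, hb2, Bool.false_eq_true,
          if_true, if_false, pv_last_get, List.foldl_cons, List.foldl_nil, pvScanStep, add_zero]
        have h2 : ((v ++ [t]).length : Int) - 1 + 1 = (((v ++ [t]) ++ [t]).length : Int) - 1 := by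
          simp only [List.length_append, List.length_cons, List.length_nil]; push_cast; ring
        rw [h2]
        exact ihl t (v ++ [t])
      · by_cases haddx : PySem.Str.slice s none (some 4) = "addx"
        · obtain ⟨hlen, -⟩ := hs haddx
          obtain ⟨a, rest, hsp0⟩ : ∃ a rest, PySem.Str.split₀ s = a :: rest := by
            cases hh : PySem.Str.split₀ s with
            | nil => rw [hh] at hlen; simp at hlen
            | cons a rest => exact ⟨a, rest, rfl⟩
          obtain ⟨b, hsp2⟩ : ∃ b, rest = [b] := by
            rw [hsp0] at hlen
            cases rest with
            | nil => simp at hlen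
            | cons b r2 => cases r2 with
              | nil => exact ⟨b, rfl⟩
              | cons c r3 => simp at hlen
          subst hsp2
          have hb1 : (s == "noop") = false := by simp [hnoop]
          have hb2 : (PySem.Str.slice s none (some 4) == "addx") = true := by simp [haddx]
          simp only [pvStepA, pvDeltas, hb1, hb2, Bool.false_eq_true,
            if_true, if_false, hsp0, pv_last_get, List.foldl_cons, List.foldl_nil,
            pvScanStep, add_zero, List.nil_append]
          have h2 : ((v ++ [t]).length : Int) - 1 + 1 = (((v ++ [t]) ++ [t]).length : Int) - 1 := by
            simp only [List.length_append, List.length_cons, List.length_nil]; push_cast; ring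
          rw [h2]
          simp only [pv_last_get]
          set k := (PySem.Int.ofStr? b).getD 0 with hk
          have h3 : (((v ++ [t]) ++ [t]).length : Int) - 1 + 1
              = ((((v ++ [t]) ++ [t]) ++ [t + k]).length : Int) - 1 := by
            simp only [List.length_append, List.length_cons, List.length_nil]; push_cast; ring
          rw [h3]
          exact ihl (t + k) ((v ++ [t]) ++ [t])
        · have hb1 : (s == "noop") = false := by simp [hnoop]
          have hb2 : (PySem.Str.slice s none (some 4) == "addx") = false := by simp [haddx]
          simp only [pvStepA, pvDeltas, hb1, hb2, Bool.false_eq_true, if_false,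
            List.foldl_nil]
          exact ihl t v

-- ===== VERDICT (by name: the statement is the Claim_ definition above) =====
theorem parse_signal_values_spec : Claim_equal_parse_signal_values := by
  intro instructions _ hpre
  unfold Spec_parse_signal_values parse_signal_values parse_signal_values_alt
  rw [PySem.List.foldl_append_eq_flatMap]
  have := pv_main instructions hpre 1 []
  simpa using this
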